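-- pv_equiv track=rewrite | github.com/amandacmelo/TP-I---Grafos | bibliotecaGrafos.py | verificaArticulacao
-- ===== SOURCE A (Python) =====
-- def ordem(grafo):
--   return len(grafo) - 1
--
-- def vizinhos(grafo, vertice):
--   vizinhos = []
--   for i in range(1, ordem(grafo)+1):
--     if grafo[vertice][i] != 0:
--       vizinhos.append(i)
--   return vizinhos
--
-- def verificaArticulacao(grafo, vertice):
--   def dfs(grafo, vertice, visitados): #Busca em profundidade
--     visitados[vertice] = True
--     for vizinho in vizinhos(grafo, vertice):
--       if not visitados[vizinho]:
--         dfs(grafo, vizinho, visitados)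
--
--   buscaOriginal =  [False] * (ordem(grafo) + 1)
--   dfs(grafo, 1, buscaOriginal)
--
--   visitados = [False] * (ordem(grafo) + 1)
--   visitados[vertice] = True
--
--   if vertice == 1:
--     dfs(grafo, 2, visitados)
--   else:
--     dfs(grafo, 1, visitados)
--
--   for i in range(1, ordem(grafo) + 1):
--     if visitados[i] != buscaOriginal[i] and i != vertice:
--       return True
--   return False
-- ===== SOURCE B (Python) =====
-- def verificaArticulacao(grafo, vertice):
--     n = len(grafo) - 1
--
--     def busca(inicio, visitados):  # iterative DFS with an explicit stack
--         visitados[inicio] = True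
--         pilha = [w for w in range(1, n + 1)
--                  if grafo[inicio][w] != 0 and not visitados[w]]
--         while pilha:
--             v = pilha.pop()
--             if not visitados[v]:
--                 visitados[v] = True
--                 for w in range(1, n + 1):
--                     if grafo[v][w] != 0 and not visitados[w]:
--                         pilha.append(w)
--         return visitados
--
--     original = busca(1, [False] * (n + 1))
--     depois = [False] * (n + 1)
--     depois[vertice] = True
--     depois = busca(2 if vertice == 1 else 1, depois)
--     return any(depois[i] != original[i] and i != vertice
--                for i in range(1, n + 1))
-- ===== Notes on version B (the rewrite author's own statement) =====
-- stated objective: alternative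
-- what changed: The recursive DFS helper is replaced by an iterative DFS with an explicit stack (mark the start, seed the stack with its unvisited neighbours, then pop/mark/push with the neighbour scan fused with the unvisited filter, no separate vizinhos list), and the final early-return scan becomes a single any(...) over the index range.
-- outside the precondition, e.g. on verificaArticulacao([[0, 0, 0], [0, 0, 0], [0, 0]], 2): A returns False, B returns False
import Mathlib
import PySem

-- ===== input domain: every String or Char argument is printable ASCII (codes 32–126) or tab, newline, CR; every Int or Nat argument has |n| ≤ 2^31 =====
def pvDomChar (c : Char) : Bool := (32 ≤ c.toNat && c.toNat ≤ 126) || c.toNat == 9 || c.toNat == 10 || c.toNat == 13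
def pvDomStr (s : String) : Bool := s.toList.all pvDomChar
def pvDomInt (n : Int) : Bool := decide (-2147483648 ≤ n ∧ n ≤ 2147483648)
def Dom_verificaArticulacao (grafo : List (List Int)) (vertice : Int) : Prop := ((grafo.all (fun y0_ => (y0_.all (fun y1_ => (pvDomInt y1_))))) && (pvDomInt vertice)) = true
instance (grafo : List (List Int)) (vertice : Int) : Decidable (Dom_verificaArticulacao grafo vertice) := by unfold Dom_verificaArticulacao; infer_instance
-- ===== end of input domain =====

-- B replaces A's recursive DFS by an iterative explicit-stack DFS (mark the start, seed the
-- stack with its unvisited neighbours, then pop/mark/push with the neighbour scan fused with the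
-- unvisited filter); same two-traversal comparison, return value only (A mutates no argument).

-- ===== PORT A =====
def ordemA (g : List (List Int)) : Int := (g.length : Int) - 1

-- grafo[v][i]; exact for the nonnegative in-range indices reached under Pre_ (Python raises otherwise)
def pvEntryA (g : List (List Int)) (v i : Int) : Int := (g.getD v.toNat []).getD i.toNat 0

def vizinhosA (g : List (List Int)) (v : Int) : List Int :=
  (PySem.List.pyRange 1 (ordemA g + 1) 1).foldl
    (fun acc i => if pvEntryA g v i ≠ 0 then acc ++ [i] else acc) []

-- A's recursive dfs; the Nat argument is a structural-recursion fuel, never exhausted when it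
-- starts at the number of vertices (each nested call marks a previously unvisited vertex).
def dfsA (g : List (List Int)) : Nat → Int → List Bool → List Bool
  | 0, _, vis => vis
  | fuel+1, v, vis =>
    (vizinhosA g v).foldl
      (fun vs w => if vs.getD w.toNat false then vs else dfsA g fuel w vs)
      (vis.set v.toNat true)

-- the final early-return loop of A
def compareA (vertice : Int) (base vis : List Bool) : List Int → Bool
  | [] => false
  | i :: rest =>
    if vis.getD i.toNat false ≠ base.getD i.toNat false ∧ i ≠ vertice then true
    else compareA vertice base vis rest

def verificaArticulacao (grafo : List (List Int)) (vertice : Int) : Bool :=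
  let buscaOriginal := dfsA grafo grafo.length 1 (List.replicate (ordemA grafo + 1).toNat false)
  let visitados0 := PySem.List.pySetD (List.replicate (ordemA grafo + 1).toNat false) vertice true
  let visitados := if vertice = 1 then dfsA grafo grafo.length 2 visitados0
                   else dfsA grafo grafo.length 1 visitados0
  compareA vertice buscaOriginal visitados (PySem.List.pyRange 1 (ordemA grafo + 1) 1)

-- ===== PORT B =====
-- termination helper for buscaB (marking an unvisited cell lowers the count of False entries)
theorem count_false_set_lt {l : List Bool} {i : Nat} (hi : i < l.length)
    (hf : l.getD i false = false) : (l.set i true).count false < l.count false := by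
  induction l generalizing i with
  | nil => simp at hi
  | cons a t ih =>
    cases i with
    | zero =>
      simp only [List.getD, List.getElem?_cons_zero, Option.getD_some] at hf
      subst hf
      simp
    | succ n =>
      have hn : n < t.length := by simpa using hi
      have := ih hn (by simpa [List.getD] using hf)
      rw [List.set_cons_succ]; simp only [List.count_cons]
      omega

-- B's stack loop: pop, mark if unvisited, push the unvisited neighbours (head = top of stack).
-- The in-range test only totalizes the Python indexing (Python raises on a popped out-of-range
-- vertex, which never happens under Pre_).
def buscaB (g : List (List Int)) (stack : List Int) (vis : List Bool) : List Bool :=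
  match stack with
  | [] => vis
  | v :: rest =>
    if h : v.toNat < vis.length ∧ vis.getD v.toNat false = false then
      buscaB g
        ((PySem.List.pyRange 1 ((g.length : Int) - 1 + 1) 1).foldl
          (fun st w =>
            if (g.getD v.toNat []).getD w.toNat 0 ≠ 0 ∧ (vis.set v.toNat true).getD w.toNat false = false
            then w :: st else st) rest)
        (vis.set v.toNat true)
    else buscaB g rest vis
termination_by (vis.count false, stack.length)
decreasing_by
  · exact Prod.Lex.left _ _ (count_false_set_lt h.1 h.2)
  · exact Prod.Lex.right _ (by simp)

-- B's busca: mark the start, seed the stack with its unvisited neighbours, then loop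
def startB (g : List (List Int)) (s : Int) (vis : List Bool) : List Bool :=
  let vis1 := vis.set s.toNat true
  buscaB g
    ((PySem.List.pyRange 1 ((g.length : Int) - 1 + 1) 1).foldl
      (fun st w =>
        if (g.getD s.toNat []).getD w.toNat 0 ≠ 0 ∧ vis1.getD w.toNat false = false
        then w :: st else st) [])
    vis1

def verificaArticulacao_alt (grafo : List (List Int)) (vertice : Int) : Bool :=
  let n := (grafo.length : Int) - 1
  let original := startB grafo 1 (List.replicate (n + 1).toNat false)
  let depois0 := PySem.List.pySetD (List.replicate (n + 1).toNat false) vertice true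
  let depois := startB grafo (if vertice = 1 then 2 else 1) depois0
  (PySem.List.pyRange 1 (n + 1) 1).any
    (fun i => decide (depois.getD i.toNat false ≠ original.getD i.toNat false) && decide (i ≠ vertice))

-- ===== PRECONDITION & SPEC =====
-- Pre_ excludes only inputs where Python A raises IndexError: vertice outside [-len, len-1]
-- (the pre-mark raises), vertice = 1 on a graph with fewer than two real vertices (the second
-- DFS starts at 2 and raises), and graphs with a row 1..n shorter than len(grafo) (a short row
-- reached by the search raises; which rows are reached depends on the traversal, so the closed
-- form asks it of all of them even though an unreached short row would not be scanned).
def Pre_verificaArticulacao (grafo : List (List Int)) (vertice : Int) : Prop :=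
  2 ≤ grafo.length ∧ -(grafo.length : Int) ≤ vertice ∧ vertice ≤ (grafo.length : Int) - 1 ∧
  (vertice = 1 → 3 ≤ grafo.length) ∧
  ∀ row ∈ grafo.tail, grafo.length ≤ row.length
instance (grafo : List (List Int)) (vertice : Int) : Decidable (Pre_verificaArticulacao grafo vertice) := by
  unfold Pre_verificaArticulacao; infer_instance

def pvWitness_verificaArticulacao : List (List Int) × Int := ([[0, 0, 0], [0, 0, 1], [0, 1, 0]], 2)

def Spec_verificaArticulacao (grafo : List (List Int)) (vertice : Int) (out : Bool) : Prop := out = verificaArticulacao_alt grafo vertice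
instance (grafo : List (List Int)) (vertice : Int) (out : Bool) : Decidable (Spec_verificaArticulacao grafo vertice out) := by unfold Spec_verificaArticulacao; infer_instance

-- ===== CLAIM (what is proved, stated in full; the proofs are below) =====
def Claim_equal_verificaArticulacao : Prop := ∀ (grafo : List (List Int)) (vertice : Int), Dom_verificaArticulacao grafo vertice → Pre_verificaArticulacao grafo vertice → Spec_verificaArticulacao grafo vertice (verificaArticulacao grafo vertice)

-- ===== LEMMAS AND PROOFS =====

-- a vertex id usable as a DFS start / intermediate vertex
def goodV (g : List (List Int)) (v : Int) : Prop := 1 ≤ v ∧ v ≤ (g.length : Int) - 1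

-- reachability from s avoiding the initially visited vertices (except possibly s itself)
inductive Reach (g : List (List Int)) (vis : List Bool) : Int → Int → Prop
  | refl (v : Int) : Reach g vis v v
  | step {v w j : Int} : w ∈ vizinhosA g v → vis.getD w.toNat false = false →
      Reach g vis w j → Reach g vis v j

theorem mem_vizinhosA {g : List (List Int)} {v w : Int} :
    w ∈ vizinhosA g v ↔ (1 ≤ w ∧ w ≤ (g.length : Int) - 1 ∧ pvEntryA g v w ≠ 0) := by
  unfold vizinhosA ordemA
  rw [PySem.List.foldl_append_ite_eq_filter]
  simp only [List.nil_append, List.mem_filter, PySem.List.mem_pyRange_one, decide_eq_true_eq]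
  constructor
  · rintro ⟨⟨h1, h2⟩, h3⟩; exact ⟨h1, by omega, h3⟩
  · rintro ⟨h1, h2, h3⟩; exact ⟨⟨h1, by omega⟩, h3⟩

theorem goodV_of_mem {g : List (List Int)} {v w : Int} (h : w ∈ vizinhosA g v) : goodV g w := by
  rcases mem_vizinhosA.1 h with ⟨h1, h2, _⟩; exact ⟨h1, h2⟩

-- getD/set toolbox
theorem getD_set_self {l : List Bool} {i : Nat} (h : i < l.length) :
    (l.set i true).getD i false = true := by
  simp [List.getD, h]
theorem getD_set_ne {l : List Bool} {b : Bool} {i k : Nat} (h : i ≠ k) :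
    (l.set i b).getD k false = l.getD k false := by
  simp [List.getD, List.getElem?_set_ne h]
theorem getD_set_mono {l : List Bool} {i k : Nat} (h : l.getD k false = true) :
    (l.set i true).getD k false = true := by
  by_cases hik : i = k
  · subst hik
    have hlt : i < l.length := by
      by_contra hlt
      have hn : l[i]? = none := List.getElem?_eq_none (by omega)
      simp [List.getD, hn] at h
    exact getD_set_self hlt
  · rw [getD_set_ne hik]; exact h
theorem getD_set_true_elim {l : List Bool} {i k : Nat}
    (h : (l.set i true).getD k false = true) :
    l.getD k false = true ∨ (k = i ∧ k < l.length) := by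
  by_cases hik : i = k
  · subst hik
    by_cases hlt : i < l.length
    · exact Or.inr ⟨rfl, hlt⟩
    · left; rw [List.set_eq_of_length_le (by omega)] at h; exact h
  · left; rwa [getD_set_ne hik] at h
theorem getD_set_false_elim {l : List Bool} {i k : Nat}
    (h : (l.set i true).getD k false = false) : l.getD k false = false := by
  cases hk : l.getD k false
  · rfl
  · rw [getD_set_mono hk] at h; exact absurd h (by simp)
theorem getD_setfalse_elim {l : List Bool} {i k : Nat}
    (h : (l.set i false).getD k false = true) : l.getD k false = true := by
  by_cases hik : i = k
  · subst hik
    by_cases hlt : i < l.length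
    · rw [List.getD, List.getElem?_set_self' ] at h
      simp [hlt] at h
    · rwa [List.set_eq_of_length_le (by omega)] at h
  · rwa [getD_set_ne hik] at h
theorem set_true_of_getD {l : List Bool} {i : Nat} (h : l.getD i false = true) :
    l.set i true = l := by
  by_cases hi : i < l.length
  · apply List.ext_getElem (by simp)
    intro n hn1 hn2
    by_cases hni : n = i
    · subst hni
      rw [List.getD, List.getElem?_eq_getElem hi] at h
      simp only [Option.getD_some] at h
      simp [h]
    · rw [List.getElem_set_ne (by omega)]
  · exact List.set_eq_of_length_le (by omega)
theorem count_false_pos {l : List Bool} {i : Nat} (hi : i < l.length)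
    (hf : l.getD i false = false) : 1 ≤ l.count false := by
  have hg : l[i]? = some false := by
    rw [List.getElem?_eq_getElem hi]
    rw [List.getD, List.getElem?_eq_getElem hi] at hf
    simpa using hf
  have hm : false ∈ l := List.mem_of_getElem? hg
  exact List.count_pos_iff.2 hm
theorem eq_of_getD {l1 l2 : List Bool} (hlen : l1.length = l2.length)
    (h : ∀ j : Nat, l1.getD j false = l2.getD j false) : l1 = l2 := by
  apply List.ext_getElem hlen
  intro n h1 h2
  have := h n
  rwa [List.getD, List.getD, List.getElem?_eq_getElem h1, List.getElem?_eq_getElem h2] at this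
theorem Reach_antitone {g : List (List Int)} {vis vs : List Bool}
    (hsub : ∀ k : Nat, vis.getD k false = true → vs.getD k false = true)
    {s j : Int} (h : Reach g vs s j) : Reach g vis s j := by
  induction h with
  | refl v => exact Reach.refl v
  | @step v w j hm hf R ih =>
    refine Reach.step hm ?_ ih
    cases hb : vis.getD w.toNat false with
    | false => rfl
    | true => rw [hsub _ hb] at hf; cases hf

theorem dfsA_succ (g : List (List Int)) (fuel : Nat) (v : Int) (vis : List Bool) :
    dfsA g (fuel+1) v vis =
      (vizinhosA g v).foldl
        (fun vs w => if vs.getD w.toNat false then vs else dfsA g fuel w vs)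
        (vis.set v.toNat true) := rfl

theorem dfsA_length {g : List (List Int)} : ∀ (fuel : Nat) (v : Int) (vis : List Bool),
    (dfsA g fuel v vis).length = vis.length := by
  intro fuel
  induction fuel with
  | zero => intro v vis; rfl
  | succ f ih =>
    intro v vis
    rw [dfsA_succ]
    have aux : ∀ (ws : List Int) (vs : List Bool),
        (ws.foldl (fun vs w => if vs.getD w.toNat false then vs else dfsA g f w vs) vs).length
          = vs.length := by
      intro ws
      induction ws with
      | nil => intro vs; rfl
      | cons w rest ihw =>
        intro vs
        simp only [List.foldl_cons]
        by_cases hb : vs.getD w.toNat false = true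
        · rw [if_pos hb]; exact ihw vs
        · rw [if_neg hb, ihw, ih]
    rw [aux, List.length_set]

theorem dfsA_mono {g : List (List Int)} : ∀ (fuel : Nat) (v : Int) (vis : List Bool) (k : Nat),
    vis.getD k false = true → (dfsA g fuel v vis).getD k false = true := by
  intro fuel
  induction fuel with
  | zero => intro v vis k h; exact h
  | succ f ih =>
    intro v vis k h
    rw [dfsA_succ]
    have aux : ∀ (ws : List Int) (vs : List Bool) (k : Nat), vs.getD k false = true →
        (ws.foldl (fun vs w => if vs.getD w.toNat false then vs else dfsA g f w vs) vs).getD k false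
          = true := by
      intro ws
      induction ws with
      | nil => intro vs k h; exact h
      | cons w rest ihw =>
        intro vs k h
        simp only [List.foldl_cons]
        by_cases hb : vs.getD w.toNat false = true
        · rw [if_pos hb]; exact ihw vs k h
        · rw [if_neg hb]; exact ihw _ k (ih w vs k h)
    exact aux _ _ _ (getD_set_mono h)

theorem foldA_mono {g : List (List Int)} (f : Nat) : ∀ (ws : List Int) (vs : List Bool) (k : Nat),
    vs.getD k false = true →
    ((ws.foldl (fun vs w => if vs.getD w.toNat false then vs else dfsA g f w vs) vs).getD k false
      = true) := by
  intro ws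
  induction ws with
  | nil => intro vs k h; exact h
  | cons w rest ihw =>
    intro vs k h
    simp only [List.foldl_cons]
    by_cases hb : vs.getD w.toNat false = true
    · rw [if_pos hb]; exact ihw vs k h
    · rw [if_neg hb]; exact ihw _ k (dfsA_mono f w vs k h)

theorem dfsA_marks {g : List (List Int)} (fuel : Nat) (v : Int) (vis : List Bool)
    (h : v.toNat < vis.length) : (dfsA g (fuel+1) v vis).getD v.toNat false = true := by
  rw [dfsA_succ]
  exact foldA_mono fuel _ _ _ (getD_set_self h)

theorem dfsA_sound {g : List (List Int)} : ∀ (fuel : Nat) (v : Int) (vis : List Bool), 0 ≤ v →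
    ∀ j : Nat, (dfsA g fuel v vis).getD j false = true →
      vis.getD j false = true ∨ Reach g vis v (j : Int) := by
  intro fuel
  induction fuel with
  | zero => intro v vis hv j h; exact Or.inl h
  | succ f ih =>
    intro v vis hv j h
    rw [dfsA_succ] at h
    have aux : ∀ (ws : List Int) (vs : List Bool),
        (∀ x ∈ ws, x ∈ vizinhosA g v) →
        (∀ k : Nat, vis.getD k false = true → vs.getD k false = true) →
        (∀ k : Nat, vs.getD k false = true → vis.getD k false = true ∨ Reach g vis v (k : Int)) →
        ∀ k : Nat,
          (ws.foldl (fun vs w => if vs.getD w.toNat false then vs else dfsA g f w vs) vs).getD k false = true →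
            vis.getD k false = true ∨ Reach g vis v (k : Int) := by
      intro ws
      induction ws with
      | nil => intro vs _ _ hI2 k hk; exact hI2 k hk
      | cons w rest ihw =>
        intro vs hmem hI1 hI2 k hk
        simp only [List.foldl_cons] at hk
        by_cases hb : vs.getD w.toNat false = true
        · rw [if_pos hb] at hk
          exact ihw vs (fun x hx => hmem x (by simp [hx])) hI1 hI2 k hk
        · rw [if_neg hb] at hk
          have hw : w ∈ vizinhosA g v := hmem w (by simp)
          have hw0 : (0 : Int) ≤ w := le_trans (by norm_num) (goodV_of_mem hw).1
          refine ihw (dfsA g f w vs) (fun x hx => hmem x (by simp [hx])) ?_ ?_ k hk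
          · intro k2 hk2; exact dfsA_mono f w vs k2 (hI1 k2 hk2)
          · intro k2 hk2
            rcases ih w vs hw0 k2 hk2 with h1 | h2
            · exact hI2 k2 h1
            · have hreach : Reach g vis w (k2 : Int) := Reach_antitone hI1 h2
              have hfree : vis.getD w.toNat false = false := by
                cases hvw : vis.getD w.toNat false with
                | false => rfl
                | true => exact absurd (hI1 _ hvw) hb
              exact Or.inr (Reach.step hw hfree hreach)
    refine aux (vizinhosA g v) _ (fun x hx => hx) (fun k hk => getD_set_mono hk) ?_ j h
    intro k hk
    rcases getD_set_true_elim hk with h1 | ⟨h2, _⟩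
    · exact Or.inl h1
    · subst h2
      right
      rw [Int.toNat_of_nonneg hv]
      exact Reach.refl v

theorem goodV_toNat_inj {g : List (List Int)} {a b : Int} (ha : goodV g a) (hb : goodV g b)
    (h : a.toNat = b.toNat) : a = b := by
  rcases ha with ⟨ha1, _⟩; rcases hb with ⟨hb1, _⟩; omega

theorem count_false_le_of_pointwise {l1 l2 : List Bool} (hlen : l1.length = l2.length)
    (h : ∀ k : Nat, l1.getD k false = true → l2.getD k false = true) :
    l2.count false ≤ l1.count false := by
  induction l1 generalizing l2 with
  | nil => cases l2 <;> simp_all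
  | cons a t ih =>
    cases l2 with
    | nil => simp
    | cons b t2 =>
      have hh := h 0
      have ht : t2.count false ≤ t.count false :=
        ih (by simpa using hlen) (fun k => by simpa [List.getD] using h (k+1))
      simp only [List.count_cons]
      simp only [List.getD, List.getElem?_cons_zero, Option.getD_some] at hh
      cases a <;> cases b <;> simp_all <;> omega

theorem dfsA_closed {g : List (List Int)} : ∀ (fuel : Nat) (v : Int) (vis : List Bool),
    vis.length = g.length → goodV g v → vis.getD v.toNat false = false →
    vis.count false ≤ fuel →
    ∀ u : Int, goodV g u → (dfsA g fuel v vis).getD u.toNat false = true →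
      vis.getD u.toNat false = false →
      ∀ w ∈ vizinhosA g u, (dfsA g fuel v vis).getD w.toNat false = true := by
  intro fuel
  induction fuel with
  | zero =>
    intro v vis hlen hv hfree hcnt u hu hmark hufree w hw
    exact absurd (show vis.getD u.toNat false = true from hmark) (by rw [hufree]; simp)
  | succ f ih =>
    intro v vis hlen hv hfree hcnt u hu hmark hufree w hw
    rw [dfsA_succ] at hmark ⊢
    have hvlt : v.toNat < vis.length := by
      rcases hv with ⟨h1, h2⟩; omega
    have hcnt1 : (vis.set v.toNat true).count false ≤ f := by
      have := count_false_set_lt hvlt hfree; omega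
    have hlen1 : (vis.set v.toNat true).length = g.length := by rw [List.length_set]; exact hlen
    have aux : ∀ (ws : List Int) (vs : List Bool),
        (∀ x ∈ ws, x ∈ vizinhosA g v) →
        vs.length = g.length →
        (∀ k : Nat, (vis.set v.toNat true).getD k false = true → vs.getD k false = true) →
        (∀ u' : Int, goodV g u' → vs.getD u'.toNat false = true →
          vis.getD u'.toNat false = false → u' ≠ v →
          ∀ w' ∈ vizinhosA g u', vs.getD w'.toNat false = true) →
        (∀ w' ∈ vizinhosA g v, w' ∉ ws → vs.getD w'.toNat false = true) →
        ((∀ u' : Int, goodV g u' →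
            (ws.foldl (fun vs w => if vs.getD w.toNat false then vs else dfsA g f w vs) vs).getD u'.toNat false = true →
            vis.getD u'.toNat false = false → u' ≠ v →
            ∀ w' ∈ vizinhosA g u',
              (ws.foldl (fun vs w => if vs.getD w.toNat false then vs else dfsA g f w vs) vs).getD w'.toNat false = true) ∧
          (∀ w' ∈ vizinhosA g v,
            (ws.foldl (fun vs w => if vs.getD w.toNat false then vs else dfsA g f w vs) vs).getD w'.toNat false = true)) := by
      intro ws
      induction ws with
      | nil =>
        intro vs _ _ _ hd he
        exact ⟨hd, fun w' hw' => he w' hw' (by simp)⟩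
      | cons w0 rest ihw =>
        intro vs hmem hlenv hI1 hd he
        simp only [List.foldl_cons]
        by_cases hb : vs.getD w0.toNat false = true
        · rw [if_pos hb]
          refine ihw vs (fun x hx => hmem x (by simp [hx])) hlenv hI1 hd ?_
          intro w' hw' hnin
          by_cases hww : w' = w0
          · subst hww; exact hb
          · exact he w' hw' (by simp [hww, hnin])
        · rw [if_neg hb]
          have hw0mem : w0 ∈ vizinhosA g v := hmem w0 (by simp)
          have hgw0 : goodV g w0 := goodV_of_mem hw0mem
          have hw0lt : w0.toNat < vs.length := by
            rcases hgw0 with ⟨h1, h2⟩; omega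
          have hb' : vs.getD w0.toNat false = false := by
            cases hx : vs.getD w0.toNat false with
            | false => rfl
            | true => exact absurd hx hb
          have hcntvs : vs.count false ≤ f :=
            le_trans (count_false_le_of_pointwise (by omega) hI1) hcnt1
          obtain ⟨f', rfl⟩ : ∃ f', f = f' + 1 := by
            cases f with
            | zero => exact absurd (count_false_pos hw0lt hb') (by omega)
            | succ f' => exact ⟨f', rfl⟩
          refine ihw (dfsA g (f' + 1) w0 vs) (fun x hx => hmem x (by simp [hx])) ?_ ?_ ?_ ?_
          · rw [dfsA_length]; exact hlenv
          · intro k hk; exact dfsA_mono _ w0 vs k (hI1 k hk)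
          · intro u' hu' hmark' hufree' hne w' hw'
            by_cases hvsu : vs.getD u'.toNat false = true
            · exact dfsA_mono _ w0 vs _ (hd u' hu' hvsu hufree' hne w' hw')
            · have hvsu' : vs.getD u'.toNat false = false := by
                cases hx : vs.getD u'.toNat false with
                | false => rfl
                | true => exact absurd hx hvsu
              exact ih w0 vs hlenv hgw0 hb' (by omega) u' hu' hmark' hvsu' w' hw'
          · intro w' hw' hnin
            by_cases hww : w' = w0
            · rw [hww]; exact dfsA_marks f' w0 vs hw0lt
            · exact dfsA_mono _ w0 vs _ (he w' hw' (by simp [hww, hnin]))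
    have hinit := aux (vizinhosA g v) (vis.set v.toNat true) (fun x hx => hx) hlen1
      (fun k hk => hk)
      (by
        intro u' hu' hmark' hufree' hne
        rcases getD_set_true_elim hmark' with h1 | ⟨h2, _⟩
        · exact absurd h1 (by rw [hufree']; simp)
        · exact absurd (goodV_toNat_inj hu' hv h2) hne)
      (fun w' hw' hnin => absurd hw' hnin)
    by_cases huv : u = v
    · subst huv; exact hinit.2 w hw
    · exact hinit.1 u hu hmark hufree huv w hw

theorem dfsA_complete {g : List (List Int)} (fuel : Nat) (v : Int) (vis : List Bool)
    (hlen : vis.length = g.length) (hv : goodV g v) (hfree : vis.getD v.toNat false = false)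
    (hcnt : vis.count false ≤ fuel) :
    ∀ j : Int, Reach g vis v j → (dfsA g fuel v vis).getD j.toNat false = true := by
  have hvlt : v.toNat < vis.length := by rcases hv with ⟨h1, h2⟩; omega
  obtain ⟨f, rfl⟩ : ∃ f, fuel = f + 1 := by
    cases fuel with
    | zero => exact absurd (count_false_pos hvlt hfree) (by omega)
    | succ f => exact ⟨f, rfl⟩
  have hmarkv : (dfsA g (f + 1) v vis).getD v.toNat false = true := dfsA_marks f v vis hvlt
  have aux : ∀ s j : Int, Reach g vis s j → goodV g s →
      (dfsA g (f + 1) v vis).getD s.toNat false = true → vis.getD s.toNat false = false →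
      (dfsA g (f + 1) v vis).getD j.toNat false = true := by
    intro s j hR
    induction hR with
    | refl s => intro _ hs _; exact hs
    | @step s w j hm hf R ihr =>
      intro hgs hms hfs
      have hrw := dfsA_closed (f + 1) v vis hlen hv hfree hcnt s hgs hms hfs w hm
      exact ihr (goodV_of_mem hm) hrw hf
  exact fun j hR => aux v j hR hv hmarkv hfree

theorem dfsA_main {g : List (List Int)} (fuel : Nat) (v : Int) (vis : List Bool)
    (hlen : vis.length = g.length) (hv : goodV g v) (hfree : vis.getD v.toNat false = false)
    (hcnt : vis.count false ≤ fuel) (j : Nat) :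
    ((dfsA g fuel v vis).getD j false = true ↔
      vis.getD j false = true ∨ Reach g vis v (j : Int)) := by
  constructor
  · exact dfsA_sound fuel v vis (le_trans (by norm_num) hv.1) j
  · rintro (h | h)
    · exact dfsA_mono fuel v vis j h
    · have := dfsA_complete fuel v vis hlen hv hfree hcnt (j : Int) h
      rwa [Int.toNat_natCast] at this

theorem reach_set_decompose {g : List (List Int)} {vis : List Bool} {v : Int} (hv0 : 0 ≤ v) :
    ∀ {s j : Int}, Reach g vis s j →
      Reach g (vis.set v.toNat true) s j ∨ j = v ∨
        ∃ w, w ∈ vizinhosA g v ∧ (vis.set v.toNat true).getD w.toNat false = false ∧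
          Reach g (vis.set v.toNat true) w j := by
  intro s j h
  induction h with
  | refl s => exact Or.inl (Reach.refl s)
  | @step s w j hm hf R ih =>
    rcases ih with h1 | h1 | h1
    · by_cases hwv : w = v
      · subst hwv
        cases h1 with
        | refl => exact Or.inr (Or.inl rfl)
        | @step _ w2 _ hm2 hf2 R2 => exact Or.inr (Or.inr ⟨w2, hm2, hf2, R2⟩)
      · have hfw : (vis.set v.toNat true).getD w.toNat false = false := by
          have hgw : goodV g w := goodV_of_mem hm
          rw [getD_set_ne (by rcases hgw with ⟨a, b⟩; omega : v.toNat ≠ w.toNat)]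
          · exact hf
        exact Or.inl (Reach.step hm hfw h1)
    · exact Or.inr (Or.inl h1)
    · exact Or.inr (Or.inr h1)

theorem reach_from_v {g : List (List Int)} {vis : List Bool} {v j : Int} (hv0 : 0 ≤ v)
    (h : Reach g vis v j) :
    j = v ∨ ∃ w, w ∈ vizinhosA g v ∧ (vis.set v.toNat true).getD w.toNat false = false ∧
      Reach g (vis.set v.toNat true) w j := by
  cases h with
  | refl => exact Or.inl rfl
  | @step _ w2 _ hm2 hf2 R2 =>
    rcases reach_set_decompose hv0 R2 with h1 | h1 | h1
    · by_cases hwv : w2 = v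
      · subst hwv
        cases h1 with
        | refl => exact Or.inl rfl
        | @step _ w3 _ hm3 hf3 R3 => exact Or.inr ⟨w3, hm3, hf3, R3⟩
      · have hgw : goodV g w2 := goodV_of_mem hm2
        have hfw : (vis.set v.toNat true).getD w2.toNat false = false := by
          rw [getD_set_ne (by rcases hgw with ⟨a, b⟩; omega : v.toNat ≠ w2.toNat)]
          exact hf2
        exact Or.inr ⟨w2, hm2, hfw, h1⟩
    · exact Or.inl h1
    · exact Or.inr h1

-- the unified characterisation of A's dfs with fuel = |grafo|, with no freeness assumption on
-- the start vertex (Pre_ no longer guarantees it: a negative vertice may pre-mark the start)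
theorem dfsA_main2 {g : List (List Int)} (s : Int) (vis : List Bool)
    (hlen : vis.length = g.length) (hs : goodV g s) (j : Nat) :
    ((dfsA g g.length s vis).getD j false = true ↔
      (vis.set s.toNat true).getD j false = true ∨
        ∃ w, w ∈ vizinhosA g s ∧ (vis.set s.toNat true).getD w.toNat false = false ∧
          Reach g (vis.set s.toNat true) w (j : Int)) := by
  have hs0 : (0 : Int) ≤ s := le_trans (by norm_num) hs.1
  have hslt : s.toNat < vis.length := by rcases hs with ⟨h1, h2⟩; omega
  by_cases hf : vis.getD s.toNat false = false
  · rw [dfsA_main g.length s vis hlen hs hf (hlen ▸ List.count_le_length ..)]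
    constructor
    · rintro (h1 | h1)
      · exact Or.inl (getD_set_mono h1)
      · rcases reach_from_v hs0 h1 with h2 | h2
        · left
          rw [show j = s.toNat by omega]
          exact getD_set_self hslt
        · exact Or.inr h2
    · rintro (h1 | ⟨w, hm, hwf, hR⟩)
      · rcases getD_set_true_elim h1 with h2 | ⟨h2, _⟩
        · exact Or.inl h2
        · right
          rw [show ((j : Nat) : Int) = s by omega]
          exact Reach.refl s
      · right
        have hwf' : vis.getD w.toNat false = false := getD_set_false_elim hwf
        exact Reach.step hm hwf' (Reach_antitone (fun k hk => getD_set_mono hk) hR)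
  · have hft : vis.getD s.toNat false = true := by
      cases hx : vis.getD s.toNat false
      · exact absurd hx hf
      · rfl
    have hset1 : vis.set s.toNat true = vis := set_true_of_getD hft
    set vis0 := vis.set s.toNat false with hvis0
    have hset0 : vis0.set s.toNat true = vis := by
      rw [hvis0, List.set_set, hset1]
    have heq : dfsA g g.length s vis = dfsA g g.length s vis0 := by
      obtain ⟨f, hfeq⟩ : ∃ f, g.length = f + 1 := by
        cases hgl : g.length with
        | zero => exact absurd hs.2 (by rw [hgl]; omega)
        | succ f => exact ⟨f, rfl⟩
      rw [hfeq, dfsA_succ, dfsA_succ, hset0, hset1]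
    have hlen0 : vis0.length = g.length := by rw [hvis0, List.length_set]; exact hlen
    have hf0 : vis0.getD s.toNat false = false := by
      rw [hvis0, List.getD, List.getElem?_set_self (by omega)]
      simp
    rw [heq, dfsA_main g.length s vis0 hlen0 hs hf0 (hlen0 ▸ List.count_le_length ..), hset1]
    constructor
    · rintro (h1 | h1)
      · exact Or.inl (getD_setfalse_elim h1)
      · rcases reach_from_v hs0 h1 with h2 | h2
        · left
          rw [show j = s.toNat by omega]
          exact hft
        · rw [hset0] at h2
          exact Or.inr h2
    · rintro (h1 | ⟨w, hm, hwf, hR⟩)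
      · by_cases hjs : j = s.toNat
        · right
          rw [show ((j : Nat) : Int) = s by omega]
          exact Reach.refl s
        · left
          rw [hvis0, getD_set_ne (by omega)]
          exact h1
      · right
        have hws : w.toNat ≠ s.toNat := by
          intro hx
          rw [hx, hft] at hwf
          cases hwf
        have hwf0 : vis0.getD w.toNat false = false := by
          rw [hvis0, getD_set_ne (Ne.symm hws)]
          exact hwf
        refine Reach.step hm hwf0 (Reach_antitone ?_ hR)
        intro k hk
        exact getD_setfalse_elim hk

theorem mem_pushFold {c : Int → Prop} [DecidablePred c] :
    ∀ (l rest : List Int) (s : Int),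
      s ∈ l.foldl (fun st w => if c w then w :: st else st) rest ↔
        s ∈ rest ∨ (s ∈ l ∧ c s) := by
  intro l
  induction l with
  | nil => intro rest s; simp
  | cons a l ih =>
    intro rest s
    simp only [List.foldl_cons]
    by_cases h : c a
    · rw [if_pos h, ih]
      simp only [List.mem_cons]
      constructor
      · rintro ((rfl | h1) | ⟨h1, h2⟩)
        · exact Or.inr ⟨Or.inl rfl, h⟩
        · exact Or.inl h1
        · exact Or.inr ⟨Or.inr h1, h2⟩
      · rintro (h1 | ⟨rfl | h1, h2⟩)
        · exact Or.inl (Or.inr h1)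
        · exact Or.inl (Or.inl rfl)
        · exact Or.inr ⟨h1, h2⟩
    · rw [if_neg h, ih]
      simp only [List.mem_cons]
      constructor
      · rintro (h1 | ⟨h1, h2⟩)
        · exact Or.inl h1
        · exact Or.inr ⟨Or.inr h1, h2⟩
      · rintro (h1 | ⟨rfl | h1, h2⟩)
        · exact Or.inl h1
        · exact absurd h2 h
        · exact Or.inr ⟨h1, h2⟩

theorem buscaB_len {g : List (List Int)} : ∀ (stack : List Int) (vis : List Bool),
    (buscaB g stack vis).length = vis.length := by
  intro stack vis
  fun_induction buscaB g stack vis with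
  | case1 => rfl
  | case2 vis v rest h ih => rw [List.length_set] at ih; exact ih
  | case3 vis v rest h ih => exact ih

theorem buscaB_spec {g : List (List Int)} : ∀ (stack : List Int) (vis : List Bool),
    vis.length = g.length → (∀ s ∈ stack, goodV g s) →
    ∀ j : Nat, ((buscaB g stack vis).getD j false = true ↔
      vis.getD j false = true ∨
        ∃ s ∈ stack, vis.getD s.toNat false = false ∧ Reach g vis s (j : Int)) := by
  intro stack vis
  fun_induction buscaB g stack vis with
  | case1 vis =>
    intro _ _ j
    simp [buscaB]
  | case2 vis v rest h ih =>
    intro hlen hgood j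
    simp only [dite_eq_ite] at ih
    have hgv : goodV g v := hgood v (by simp)
    have hv0 : (0 : Int) ≤ v := le_trans (by norm_num) hgv.1
    have hlen1 : (vis.set v.toNat true).length = g.length := by
      rw [List.length_set]; exact hlen
    have hviz : ∀ s : Int, s ∈ vizinhosA g v ↔
        (s ∈ PySem.List.pyRange 1 ((g.length : Int) - 1 + 1) 1 ∧ (g.getD v.toNat []).getD s.toNat 0 ≠ 0) := by
      intro s
      rw [mem_vizinhosA, PySem.List.mem_pyRange_one]
      constructor
      · rintro ⟨a, b, c⟩; exact ⟨⟨a, by omega⟩, c⟩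
      · rintro ⟨⟨a, b⟩, c⟩; exact ⟨a, by omega, c⟩
    have hpush : ∀ s : Int,
        s ∈ (PySem.List.pyRange 1 ((g.length : Int) - 1 + 1) 1).foldl
            (fun st w => if (g.getD v.toNat []).getD w.toNat 0 ≠ 0 ∧ (vis.set v.toNat true).getD w.toNat false = false
              then w :: st else st) rest ↔
          s ∈ rest ∨ (s ∈ vizinhosA g v ∧ (vis.set v.toNat true).getD s.toNat false = false) := by
      intro s
      rw [mem_pushFold (c := fun w => (g.getD v.toNat []).getD w.toNat 0 ≠ 0 ∧ (vis.set v.toNat true).getD w.toNat false = false)]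
      constructor
      · rintro (h1 | ⟨h1, h2, h3⟩)
        · exact Or.inl h1
        · exact Or.inr ⟨(hviz s).2 ⟨h1, h2⟩, h3⟩
      · rintro (h1 | ⟨h1, h2⟩)
        · exact Or.inl h1
        · rcases (hviz s).1 h1 with ⟨a, b⟩; exact Or.inr ⟨a, b, h2⟩
    have hgood' : ∀ s ∈ (PySem.List.pyRange 1 ((g.length : Int) - 1 + 1) 1).foldl
        (fun st w => if (g.getD v.toNat []).getD w.toNat 0 ≠ 0 ∧ (vis.set v.toNat true).getD w.toNat false = false
          then w :: st else st) rest, goodV g s := by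
      intro s hs
      rcases (hpush s).1 hs with h1 | ⟨h1, _⟩
      · exact hgood s (by simp [h1])
      · exact goodV_of_mem h1
    rw [ih hlen1 hgood' j]
    have hmarkj : (j : Int) = v → (vis.set v.toNat true).getD j false = true := by
      intro h2
      have hj : j = v.toNat := by omega
      rw [hj]; exact getD_set_self h.1
    constructor
    · rintro (h1 | ⟨s, hs, hf1, hR1⟩)
      · rcases getD_set_true_elim h1 with h2 | ⟨h2, _⟩
        · exact Or.inl h2
        · refine Or.inr ⟨v, by simp, h.2, ?_⟩
          rw [show ((j : Nat) : Int) = v by omega]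
          exact Reach.refl v
      · have hfv : vis.getD s.toNat false = false := getD_set_false_elim hf1
        have hRv : Reach g vis s (j : Int) := Reach_antitone (fun k hk => getD_set_mono hk) hR1
        rcases (hpush s).1 hs with h2 | ⟨h2, _⟩
        · exact Or.inr ⟨s, by simp [h2], hfv, hRv⟩
        · exact Or.inr ⟨v, by simp, h.2, Reach.step h2 hfv hRv⟩
    · rintro (h1 | ⟨s, hs, hf1, hR1⟩)
      · exact Or.inl (getD_set_mono h1)
      · simp only [List.mem_cons] at hs
        have hfromv : Reach g vis v (j : Int) →
            ((vis.set v.toNat true).getD j false = true ∨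
              ∃ s ∈ (PySem.List.pyRange 1 ((g.length : Int) - 1 + 1) 1).foldl
                (fun st w => if (g.getD v.toNat []).getD w.toNat 0 ≠ 0 ∧ (vis.set v.toNat true).getD w.toNat false = false
                  then w :: st else st) rest,
                (vis.set v.toNat true).getD s.toNat false = false ∧
                  Reach g (vis.set v.toNat true) s (j : Int)) := by
          intro hR
          rcases reach_from_v hv0 hR with h2 | ⟨w, hwm, hwf, hwR⟩
          · exact Or.inl (hmarkj h2)
          · exact Or.inr ⟨w, (hpush w).2 (Or.inr ⟨hwm, hwf⟩), hwf, hwR⟩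
        rcases hs with rfl | hs
        · exact hfromv hR1
        · by_cases hsv : s = v
          · subst hsv; exact hfromv hR1
          · rcases reach_set_decompose hv0 hR1 with h2 | h2 | ⟨w, hwm, hwf, hwR⟩
            · have hgs : goodV g s := hgood s (by simp [hs])
              have hf1' : (vis.set v.toNat true).getD s.toNat false = false := by
                rw [getD_set_ne (by
                  intro hx
                  exact hsv (goodV_toNat_inj hgs hgv hx.symm))]
                exact hf1
              exact Or.inr ⟨s, (hpush s).2 (Or.inl hs), hf1', h2⟩
            · exact Or.inl (hmarkj h2)
            · exact Or.inr ⟨w, (hpush w).2 (Or.inr ⟨hwm, hwf⟩), hwf, hwR⟩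
  | case3 vis v rest h ih =>
    intro hlen hgood j
    rw [ih hlen (fun s hs => hgood s (by simp [hs])) j]
    constructor
    · rintro (h1 | ⟨s, hs, a, b⟩)
      · exact Or.inl h1
      · exact Or.inr ⟨s, by simp [hs], a, b⟩
    · rintro (h1 | ⟨s, hs, a, b⟩)
      · exact Or.inl h1
      · rcases List.mem_cons.1 hs with rfl | hs'
        · have hgv : goodV g s := hgood s (by simp)
          have : s.toNat < vis.length := by rcases hgv with ⟨x, y⟩; omega
          exact absurd ⟨this, a⟩ h
        · exact Or.inr ⟨s, hs', a, b⟩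

-- B's busca marks exactly the vertices in vis.set s true plus those reachable through
-- unvisited vertices from an unvisited neighbour of s
theorem startB_spec {g : List (List Int)} (s : Int) (vis : List Bool)
    (hlen : vis.length = g.length) (hs : goodV g s) (j : Nat) :
    ((startB g s vis).getD j false = true ↔
      (vis.set s.toNat true).getD j false = true ∨
        ∃ w, w ∈ vizinhosA g s ∧ (vis.set s.toNat true).getD w.toNat false = false ∧
          Reach g (vis.set s.toNat true) w (j : Int)) := by
  unfold startB
  have hlen1 : (vis.set s.toNat true).length = g.length := by
    rw [List.length_set]; exact hlen
  have hviz : ∀ x : Int, x ∈ vizinhosA g s ↔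
      (x ∈ PySem.List.pyRange 1 ((g.length : Int) - 1 + 1) 1 ∧ (g.getD s.toNat []).getD x.toNat 0 ≠ 0) := by
    intro x
    rw [mem_vizinhosA, PySem.List.mem_pyRange_one]
    constructor
    · rintro ⟨a, b, c⟩; exact ⟨⟨a, by omega⟩, c⟩
    · rintro ⟨⟨a, b⟩, c⟩; exact ⟨a, by omega, c⟩
  have hpush : ∀ x : Int,
      x ∈ (PySem.List.pyRange 1 ((g.length : Int) - 1 + 1) 1).foldl
          (fun st w => if (g.getD s.toNat []).getD w.toNat 0 ≠ 0 ∧ (vis.set s.toNat true).getD w.toNat false = false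
            then w :: st else st) ([] : List Int) ↔
        (x ∈ vizinhosA g s ∧ (vis.set s.toNat true).getD x.toNat false = false) := by
    intro x
    rw [mem_pushFold (c := fun w => (g.getD s.toNat []).getD w.toNat 0 ≠ 0 ∧ (vis.set s.toNat true).getD w.toNat false = false)]
    constructor
    · rintro (h1 | ⟨h1, h2, h3⟩)
      · cases h1
      · exact ⟨(hviz x).2 ⟨h1, h2⟩, h3⟩
    · rintro ⟨h1, h2⟩
      rcases (hviz x).1 h1 with ⟨a, b⟩
      exact Or.inr ⟨a, b, h2⟩
  rw [buscaB_spec _ _ hlen1 (fun x hx => goodV_of_mem ((hpush x).1 hx).1) j]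
  constructor
  · rintro (h1 | ⟨x, hx, a, b⟩)
    · exact Or.inl h1
    · exact Or.inr ⟨x, ((hpush x).1 hx).1, a, b⟩
  · rintro (h1 | ⟨w, hm, a, b⟩)
    · exact Or.inl h1
    · exact Or.inr ⟨w, (hpush w).2 ⟨hm, a⟩, a, b⟩

-- the two DFS implementations mark the same list of vertices
theorem dfsA_eq_startB {g : List (List Int)} (s : Int) (vis : List Bool)
    (hlen : vis.length = g.length) (hs : goodV g s) :
    dfsA g g.length s vis = startB g s vis := by
  apply eq_of_getD
  · rw [dfsA_length]
    unfold startB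
    rw [buscaB_len, List.length_set]
  · intro j
    have hA := dfsA_main2 s vis hlen hs j
    have hB := startB_spec s vis hlen hs j
    cases hu : (dfsA g g.length s vis).getD j false <;>
      cases hw : (startB g s vis).getD j false <;> simp_all

theorem compareA_eq_any (vertice : Int) (base vis : List Bool) : ∀ l : List Int,
    compareA vertice base vis l =
      l.any (fun i => decide (vis.getD i.toNat false ≠ base.getD i.toNat false) && decide (i ≠ vertice)) := by
  intro l
  induction l with
  | nil => rfl
  | cons i rest ih =>
    by_cases h1 : vis.getD i.toNat false ≠ base.getD i.toNat false
    · by_cases h2 : i ≠ vertice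
      · simp [compareA, h1, h2, ih]
      · simp [compareA, h1, h2, ih]
    · simp [compareA, h1, ih]

theorem pySetD_neg (xs : List Bool) (i : Int) (v : Bool) (h1 : -(xs.length : Int) ≤ i)
    (h2 : i < 0) : PySem.List.pySetD xs i v = xs.set (i + xs.length).toNat v := by
  simp only [PySem.List.pySetD, PySem.List.pySet?, PySem.List.pyIdx?]
  rw [if_neg (by omega), if_pos (by omega)]
  simp only [Option.map_some, Option.getD_some]
  congr 1
  omega

-- ===== VERDICT (by name: the statement is the Claim_ definition above) =====
theorem verificaArticulacao_spec : Claim_equal_verificaArticulacao := by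
  unfold Claim_equal_verificaArticulacao
  intro g vertice _ hpre
  unfold Spec_verificaArticulacao
  obtain ⟨hm, hlo, hhi, hv3, _⟩ := hpre
  have hVFlen : (List.replicate ((g.length : Int) - 1 + 1).toNat false).length = g.length := by
    rw [List.length_replicate]; omega
  have hg1 : goodV g 1 := ⟨le_refl 1, by omega⟩
  have hbase := dfsA_eq_startB 1 _ hVFlen hg1
  have hlen0 : ∀ I : Nat, ((List.replicate ((g.length : Int) - 1 + 1).toNat false).set I true).length
      = g.length := by intro I; rw [List.length_set]; exact hVFlen
  by_cases hneg : vertice < 0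
  · -- negative vertice: Python wraps the pre-mark to index vertice + len, and the start is 1
    have hveq : ¬ vertice = 1 := by omega
    have hset : PySem.List.pySetD (List.replicate ((g.length : Int) - 1 + 1).toNat false) vertice true
        = (List.replicate ((g.length : Int) - 1 + 1).toNat false).set
            (vertice + ((List.replicate ((g.length : Int) - 1 + 1).toNat false).length : Int)).toNat true :=
      pySetD_neg _ _ _ (by rw [hVFlen]; omega) hneg
    rw [hVFlen] at hset
    have hvis := dfsA_eq_startB 1 ((List.replicate ((g.length : Int) - 1 + 1).toNat false).set (vertice + (g.length : Int)).toNat true) (hlen0 _) hg1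
    simp only [verificaArticulacao, verificaArticulacao_alt, ordemA, compareA_eq_any]
    rw [hset, if_neg hveq, if_neg hveq, hbase, hvis]
  · have hset : PySem.List.pySetD (List.replicate ((g.length : Int) - 1 + 1).toNat false) vertice true
        = (List.replicate ((g.length : Int) - 1 + 1).toNat false).set vertice.toNat true :=
      PySem.List.pySetD_of_nonneg _ _ (by omega)
    by_cases hveq : vertice = 1
    · subst hveq
      have hm3 : 3 ≤ g.length := hv3 rfl
      have hg2 : goodV g 2 := ⟨by norm_num, by omega⟩
      have hvis := dfsA_eq_startB 2 ((List.replicate ((g.length : Int) - 1 + 1).toNat false).set (1 : Int).toNat true) (hlen0 _) hg2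
      simp only [verificaArticulacao, verificaArticulacao_alt, ordemA, compareA_eq_any]
      rw [hset, if_pos trivial, if_pos trivial, hbase, hvis]
    · have hvis := dfsA_eq_startB 1 ((List.replicate ((g.length : Int) - 1 + 1).toNat false).set vertice.toNat true) (hlen0 _) hg1
      simp only [verificaArticulacao, verificaArticulacao_alt, ordemA, compareA_eq_any]
      rw [hset, if_neg hveq, if_neg hveq, hbase, hvis]
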